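-- pv_equiv track=rewrite | github.com/JaraVictoria/SSL | todojunto_lexeryparser.py | automata_igual
-- ===== SOURCE A (Python) =====
-- def automata_igual(cadena):
-- 	estado = 0
-- 	estados_finales = [1]
--
-- 	for caracter in cadena:
-- 		if estado == 0 and caracter == "=":
-- 			estado = 1
-- 		else:
-- 			estado = -1
-- 			break
--
-- 	if estado == -1:
-- 		return ESTADO_TRAMPA
-- 	if estado in estados_finales:
-- 		return ESTADO_FINAL
-- 	else:
-- 		return ESTADO_NO_FINAL
--
-- ESTADO_FINAL = "ESTADO ACEPTADO"
--
-- ESTADO_NO_FINAL = "ESTADO NO ACEPTADO"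
--
-- ESTADO_TRAMPA = "ESTADO TRAMPA"
-- ===== SOURCE B (Python) =====
-- def automata_igual(cadena):
--     items = list(cadena)
--     if items == ["="]:
--         return ESTADO_FINAL
--     if items == []:
--         return ESTADO_NO_FINAL
--     return ESTADO_TRAMPA
--
-- ESTADO_FINAL = "ESTADO ACEPTADO"
--
-- ESTADO_NO_FINAL = "ESTADO NO ACEPTADO"
--
-- ESTADO_TRAMPA = "ESTADO TRAMPA"
-- ===== Notes on version B (the rewrite author's own statement) =====
-- stated objective: simpler
-- what changed: Replaces the per-character state-machine loop with a direct three-way classification of the materialized character list (['='] / [] / anything else).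
import Mathlib
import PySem

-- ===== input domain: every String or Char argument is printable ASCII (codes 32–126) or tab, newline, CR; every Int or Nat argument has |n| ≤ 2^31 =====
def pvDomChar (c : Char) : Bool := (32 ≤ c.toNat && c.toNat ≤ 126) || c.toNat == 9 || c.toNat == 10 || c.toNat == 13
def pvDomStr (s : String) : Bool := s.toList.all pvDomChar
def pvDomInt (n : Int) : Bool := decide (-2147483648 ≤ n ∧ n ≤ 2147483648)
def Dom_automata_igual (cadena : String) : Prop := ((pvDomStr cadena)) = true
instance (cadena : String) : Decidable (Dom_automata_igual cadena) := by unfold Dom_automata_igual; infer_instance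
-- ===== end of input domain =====

-- B replaces A's state-machine loop with one comparison of the character list; same return value, no speed claim.

-- ===== PORT A =====
-- the for-loop with break: recursion over the remaining characters carrying `estado`
def automataIgualLoop (estado : Int) (cs : List Char) : Int :=
  match cs with
  | [] => estado
  | c :: rest =>
    if estado = 0 ∧ c = '=' then automataIgualLoop 1 rest
    else (-1 : Int)  -- estado = -1; break

def automata_igual (cadena : String) : String :=
  let estado : Int := 0
  let estados_finales : List Int := [1]
  let estado := automataIgualLoop estado cadena.toList
  if estado = -1 then "ESTADO TRAMPA"
  else if estado ∈ estados_finales then "ESTADO ACEPTADO"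
  else "ESTADO NO ACEPTADO"

-- ===== PORT B =====
def automata_igual_alt (cadena : String) : String :=
  let items := cadena.toList
  if items = ['='] then "ESTADO ACEPTADO"
  else if items = [] then "ESTADO NO ACEPTADO"
  else "ESTADO TRAMPA"

-- ===== PRECONDITION & SPEC =====
def Spec_automata_igual (cadena : String) (out : String) : Prop := out = automata_igual_alt cadena
instance (cadena : String) (out : String) : Decidable (Spec_automata_igual cadena out) := by unfold Spec_automata_igual; infer_instance

-- ===== CLAIM (what is proved, stated in full; the proofs are below) =====
def Claim_equal_automata_igual : Prop := ∀ (cadena : String), Dom_automata_igual cadena → Spec_automata_igual cadena (automata_igual cadena)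

-- ===== LEMMAS AND PROOFS =====
theorem eq_of_list (cadena : String) :
    automata_igual cadena = automata_igual_alt cadena := by
  unfold automata_igual automata_igual_alt
  match h : cadena.toList with
  | [] => simp [automataIgualLoop]
  | [c] =>
    by_cases hc : c = '='
    · simp [automataIgualLoop, hc]
    · simp [automataIgualLoop, hc]
  | c :: d :: rest =>
    by_cases hc : c = '='
    · simp [automataIgualLoop, hc]
    · simp [automataIgualLoop, hc]

-- ===== VERDICT (by name: the statement is the Claim_ definition above) =====
theorem automata_igual_spec : Claim_equal_automata_igual := by
  intro cadena _
  exact eq_of_list cadena
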